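-- pv_equiv track=rewrite | github.com/Dakuritsu/Solveur-de-Taquin | taquin_de_base.py | est_etat_final
-- ===== SOURCE A (Python) =====
-- def est_etat_final(etat):
--     k = len(etat)
--     n = k * k
--
--     etat_final = []
--     for i in range(k):
--         ligne = []
--         for j in range(k):
--             val = (i * k + j + 1) % n
--             ligne.append(val)
--         etat_final.append(ligne)
--
--     return etat == etat_final
-- ===== SOURCE B (Python) =====
-- def est_etat_final(etat):
--     k = len(etat)
--     n = k * k
--     for i, ligne in enumerate(etat):
--         if len(ligne) != k:
--             return False
--         for j, val in enumerate(ligne):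
--             if val != (i * k + j + 1) % n:
--                 return False
--     return True
-- ===== Notes on version B (the rewrite author's own statement) =====
-- stated objective: simpler
-- what changed: B drops the construction of the goal board entirely and checks each cell in place against its expected solved value (i*k+j+1) % n with early exit, instead of materializing etat_final and comparing lists.
import Mathlib
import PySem

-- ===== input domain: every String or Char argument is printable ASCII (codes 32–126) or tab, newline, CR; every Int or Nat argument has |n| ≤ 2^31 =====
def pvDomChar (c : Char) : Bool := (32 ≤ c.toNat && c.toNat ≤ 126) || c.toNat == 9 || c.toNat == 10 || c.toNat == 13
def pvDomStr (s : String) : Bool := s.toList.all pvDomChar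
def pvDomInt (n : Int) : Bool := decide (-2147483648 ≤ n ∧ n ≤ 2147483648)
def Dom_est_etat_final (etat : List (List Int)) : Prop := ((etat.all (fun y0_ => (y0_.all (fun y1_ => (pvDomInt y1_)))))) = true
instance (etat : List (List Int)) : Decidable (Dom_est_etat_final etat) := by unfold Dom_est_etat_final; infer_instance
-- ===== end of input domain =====

-- B checks each cell in place against (i*k+j+1) % n with early exit instead of building the goal board and comparing (objective: simpler).

-- ===== PORT A =====
def est_etat_final (etat : List (List Int)) : Bool :=
  let k : Int := etat.length
  let n : Int := k * k
  let etat_final : List (List Int) :=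
    (PySem.List.pyRange 0 k 1).foldl (fun acc i =>
      acc ++ [ (PySem.List.pyRange 0 k 1).foldl (fun ligne j =>
                 ligne ++ [PySem.Int.mod (i * k + j + 1) n]) [] ]) []
  decide (etat = etat_final)

-- ===== PORT B =====
def altRow (k n i : Int) : Int → List Int → Bool
  | _, [] => true
  | j, v :: rest =>
    if v ≠ PySem.Int.mod (i * k + j + 1) n then false else altRow k n i (j + 1) rest

def altRows (k n : Int) : Int → List (List Int) → Bool
  | _, [] => true
  | i, ligne :: rest =>
    if (ligne.length : Int) ≠ k then false
    else if altRow k n i 0 ligne then altRows k n (i + 1) rest else false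

def est_etat_final_alt (etat : List (List Int)) : Bool :=
  let k : Int := etat.length
  let n : Int := k * k
  altRows k n 0 etat

-- ===== PRECONDITION & SPEC =====
def Spec_est_etat_final (etat : List (List Int)) (out : Bool) : Prop := out = est_etat_final_alt etat
instance (etat : List (List Int)) (out : Bool) : Decidable (Spec_est_etat_final etat out) := by unfold Spec_est_etat_final; infer_instance

-- ===== CLAIM (what is proved, stated in full; the proofs are below) =====
def Claim_equal_est_etat_final : Prop := ∀ (etat : List (List Int)), Dom_est_etat_final etat → Spec_est_etat_final etat (est_etat_final etat)

-- ===== LEMMAS AND PROOFS =====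

theorem altRow_iff (k n i : Int) (j0 : Int) (xs : List Int) :
    altRow k n i j0 xs = true ↔
      ∀ (u : Nat) (h : u < xs.length), xs[u] = PySem.Int.mod (i * k + (j0 + u) + 1) n := by
  induction xs generalizing j0 with
  | nil => simp [altRow]
  | cons v rest ih =>
    simp only [altRow]
    by_cases hv : v = PySem.Int.mod (i * k + j0 + 1) n
    · rw [if_neg (by simp [hv])]
      rw [ih (j0 + 1)]
      constructor
      · intro h u hu
        cases u with
        | zero => simpa using hv
        | succ m =>
          have hm := h m (by simpa using Nat.lt_of_succ_lt_succ hu)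
          simp only [List.getElem_cons_succ]
          rw [hm]; congr 1; push_cast; ring
      · intro h u hu
        have hm := h (u + 1) (by simpa using Nat.succ_lt_succ hu)
        simp only [List.getElem_cons_succ] at hm
        rw [hm]; congr 1; push_cast; ring
    · rw [if_pos (by simpa using hv)]
      refine iff_of_false (by simp) fun h => hv ?_
      simpa using h 0 (by simp)

theorem altRows_iff (k n : Int) (i0 : Int) (ls : List (List Int)) :
    altRows k n i0 ls = true ↔
      ∀ (t : Nat) (h : t < ls.length),
        ((ls[t].length : Int) = k ∧
          ∀ (u : Nat) (h2 : u < ls[t].length),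
            ls[t][u] = PySem.Int.mod ((i0 + t) * k + u + 1) n) := by
  induction ls generalizing i0 with
  | nil => simp [altRows]
  | cons ligne rest ih =>
    simp only [altRows]
    by_cases hl : (ligne.length : Int) = k
    · rw [if_neg (by simp [hl])]
      by_cases hr : altRow k n i0 0 ligne = true
      · rw [if_pos hr, ih (i0 + 1)]
        rw [altRow_iff] at hr
        constructor
        · intro h t ht
          cases t with
          | zero =>
            refine ⟨by simpa using hl, fun u hu => ?_⟩
            simp only [List.getElem_cons_zero] at hu ⊢
            rw [hr u hu]; congr 1; push_cast; ring
          | succ m =>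
            obtain ⟨h1, h2⟩ := h m (by simpa using Nat.lt_of_succ_lt_succ ht)
            refine ⟨by simpa using h1, fun u hu => ?_⟩
            simp only [List.getElem_cons_succ] at hu ⊢
            rw [h2 u hu]; congr 1; push_cast; ring
        · intro h t ht
          obtain ⟨h1, h2⟩ := h (t + 1) (by simpa using Nat.succ_lt_succ ht)
          simp only [List.getElem_cons_succ] at h1 h2
          refine ⟨h1, fun u hu => ?_⟩
          rw [h2 u hu]; congr 1; push_cast; ring
      · rw [if_neg hr]
        refine iff_of_false (by simp) fun h => hr ?_
        obtain ⟨-, hc⟩ := h 0 (by simp)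
        rw [altRow_iff]
        intro u hu
        have := hc u (by simpa using hu)
        simp only [List.getElem_cons_zero] at this
        rw [this]; congr 1; push_cast; ring
    · rw [if_pos (by simpa using hl)]
      refine iff_of_false (by simp) fun h => hl ?_
      simpa using (h 0 (by simp)).1

-- A's goal board, after collapsing the append-folds to maps over List.range.
theorem estA_eq_decide (etat : List (List Int)) :
    est_etat_final etat =
      decide (etat =
        (List.range etat.length).map (fun (i : Nat) =>
          (List.range etat.length).map (fun (j : Nat) =>
            PySem.Int.mod ((i : Int) * etat.length + (j : Int) + 1) ((etat.length : Int) * etat.length)))) := by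
  unfold est_etat_final
  simp only [PySem.List.foldl_append_singleton_eq_map, PySem.List.pyRange_one]
  simp [List.map_map, Function.comp_def]

theorem est_eq (etat : List (List Int)) :
    est_etat_final etat = est_etat_final_alt etat := by
  rw [estA_eq_decide]
  unfold est_etat_final_alt
  rw [Bool.eq_iff_iff]
  simp only [decide_eq_true_iff, altRows_iff]
  constructor
  · intro hEq t ht
    have hrow : etat[t] = (List.range etat.length).map (fun (j : Nat) =>
        PySem.Int.mod ((t : Int) * etat.length + (j : Int) + 1) ((etat.length : Int) * etat.length)) := by
      have := List.getElem_of_eq hEq ht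
      simpa using this
    refine ⟨by rw [hrow]; simp, fun u hu => ?_⟩
    have hu' : u < etat.length := by rw [hrow] at hu; simpa using hu
    simp only [hrow, List.getElem_map, List.getElem_range]
    congr 1; ring
  · intro h
    apply List.ext_getElem
    · simp
    · intro t h1 h2
      obtain ⟨hlen, hcell⟩ := h t h1
      apply List.ext_getElem
      · simpa using (by exact_mod_cast hlen : etat[t].length = etat.length)
      · intro u hu1 hu2
        rw [hcell u hu1]
        simp only [List.getElem_map, List.getElem_range]
        congr 1; ring

-- ===== VERDICT (by name: the statement is the Claim_ definition above) =====
theorem est_etat_final_spec : Claim_equal_est_etat_final := by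
  intro etat _
  unfold Spec_est_etat_final
  exact est_eq etat
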